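-- pv_equiv track=rewrite | github.com/iffxxxx/BAEKJOON | 1065.py | solution
-- ===== SOURCE A (Python) =====
-- def solution(N):
--     tem = [i for i in range(1,100)]
--     for i in range(1,10):
--         for j in range(0,5):
--             if i + 2 * j < 10:
--                 temp = str(i) + str(i + j) + str(i + 2 * j)
--                 tem.append(int(temp))
--             if i - 2 * j >= 0:
--                 temp = str(i) + str(i - j) + str(i - 2 * j)
--                 tem.append(int(temp))
--     tem = set(sorted(tem))
--     return len([i for i in tem if i <= N])
-- ===== SOURCE B (Python) =====
-- def solution(N):
--     # 1..99 are all han-su: closed-form clamp; 3-digit han-su are built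
--     # arithmetically as 111*i + 12*d (digits i, i+d, i+2*d), no strings, no set.
--     count = max(0, min(N, 99))
--     for i in range(1, 10):
--         for d in range(-4, 5):
--             last = i + 2 * d
--             if 0 <= last <= 9 and 111 * i + 12 * d <= N:
--                 count += 1
--     return count
-- ===== Notes on version B (the rewrite author's own statement) =====
-- stated objective: simpler
-- what changed: B replaces A's string-built candidate list plus sort/set-dedup/filter with a closed-form clamp for the 99 small han-su and a direct arithmetic enumeration 111*i+12*d of the distinct 3-digit han-su, counting those <= N in one pass with no strings, no sort and no set.
import Mathlib
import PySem

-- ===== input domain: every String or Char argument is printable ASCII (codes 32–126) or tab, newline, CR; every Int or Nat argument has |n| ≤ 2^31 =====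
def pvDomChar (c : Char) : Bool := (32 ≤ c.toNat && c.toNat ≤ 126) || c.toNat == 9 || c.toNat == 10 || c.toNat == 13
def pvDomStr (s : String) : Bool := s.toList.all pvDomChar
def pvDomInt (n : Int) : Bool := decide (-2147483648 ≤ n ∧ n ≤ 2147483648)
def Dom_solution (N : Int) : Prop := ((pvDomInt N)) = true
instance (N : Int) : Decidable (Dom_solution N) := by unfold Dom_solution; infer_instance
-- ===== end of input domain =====

-- B replaces A's string-built candidate list + sort + set-dedup + filter by a closed-form clamp
-- for 1..99 plus a direct arithmetic enumeration 111*i+12*d of the 3-digit han-su (simpler).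

-- ===== PORT A =====
-- int(str(a) + str(b) + str(c)); the characters are always digits here, so ofChars? is always
-- some and the .getD 0 default branch is never taken.
def pvTriple (a b c : Int) : Int :=
  (PySem.Int.ofChars? (PySem.Int.toChars a ++ PySem.Int.toChars b ++ PySem.Int.toChars c)).getD 0

-- the N-independent part of A: tem built, sorted, then set() (insertion-order dedup)
def pvASet : List Int :=
  let tem : List Int := (PySem.List.pyRange 1 100 1).map (fun i => i)
  let tem := (PySem.List.pyRange 1 10 1).foldl (fun tem i =>
    (PySem.List.pyRange 0 5 1).foldl (fun tem j =>
      let tem := if i + 2 * j < 10 then tem ++ [pvTriple i (i + j) (i + 2 * j)] else tem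
      if i - 2 * j ≥ 0 then tem ++ [pvTriple i (i - j) (i - 2 * j)] else tem) tem) tem
  PySem.Set.ofList (PySem.List.sorted tem (fun x => x) false)

def solution (N : Int) : Int :=
  ((pvASet.filter (fun i => decide (i ≤ N))).length : Int)

-- ===== PORT B =====
def solution_alt (N : Int) : Int :=
  let count : Int := max 0 (min N 99)
  (PySem.List.pyRange 1 10 1).foldl (fun count i =>
    (PySem.List.pyRange (-4) 5 1).foldl (fun count d =>
      let last := i + 2 * d
      if 0 ≤ last ∧ last ≤ 9 ∧ 111 * i + 12 * d ≤ N then count + 1 else count) count) count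

-- ===== PRECONDITION & SPEC =====
def Spec_solution (N : Int) (out : Int) : Prop := out = solution_alt N
instance (N : Int) (out : Int) : Decidable (Spec_solution N out) := by unfold Spec_solution; infer_instance

-- ===== CLAIM (what is proved, stated in full; the proofs are below) =====
def Claim_equal_solution : Prop := ∀ (N : Int), Dom_solution N → Spec_solution N (solution N)

-- ===== LEMMAS AND PROOFS =====

-- the 45 three-digit han-su, ascending
def pvH45 : List Int :=
  [111, 123, 135, 147, 159, 210, 222, 234, 246, 258, 321, 333, 345, 357, 369,
   420, 432, 444, 456, 468, 531, 543, 555, 567, 579, 630, 642, 654, 666, 678,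
   741, 753, 765, 777, 789, 840, 852, 864, 876, 888, 951, 963, 975, 987, 999]

set_option maxRecDepth 8000 in
lemma pvASet_eq : pvASet = (List.range' 1 99).map (fun (j : Nat) => (j : Int)) ++ pvH45 := by decide

lemma count_range' (N : Int) : ∀ k : Nat,
    ((((List.range' 1 k).map (fun (j : Nat) => (j : Int))).filter
        (fun i => decide (i ≤ N))).length : Int)
      = max 0 (min N k) := by
  intro k
  induction k with
  | zero => simp
  | succ k ih =>
    rw [List.range'_1_concat, List.map_append, List.filter_append, List.length_append]
    simp only [List.map_cons, List.map_nil, List.filter_cons, List.filter_nil]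
    push_cast at ih ⊢
    by_cases h : 1 + (k : Int) ≤ N
    · simp only [h, decide_true, if_true, List.length_cons, List.length_nil]
      push_cast
      omega
    · simp only [h, decide_false, Bool.false_eq_true, if_false, List.length_nil]
      push_cast
      omega

lemma solution_eq (N : Int) :
    solution N = max 0 (min N 99) + (pvH45.countP (fun x => decide (x ≤ N)) : Int) := by
  simp only [solution, pvASet_eq, List.filter_append, List.length_append]
  push_cast
  rw [count_range' N 99, List.countP_eq_length_filter]
  norm_num

-- B's fixed row of 3-digit han-su with leading digit i, out of candidate differences l
def pvRowOf (i : Int) (l : List Int) : List Int :=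
  (l.filter (fun d => decide (0 ≤ i + 2 * d ∧ i + 2 * d ≤ 9))).map (fun d => 111 * i + 12 * d)

lemma ite_guard3 (p q r : Prop) [Decidable p] [Decidable q] [Decidable r] (c : Int) :
    (if p ∧ q ∧ r then c + 1 else c) = if p ∧ q then (if r then c + 1 else c) else c := by
  by_cases hp : p <;> by_cases hq : q <;> by_cases hr : r <;> simp [hp, hq, hr]

lemma inner_count (N i : Int) : ∀ (l : List Int) (c : Int),
    l.foldl (fun c d => if 0 ≤ i + 2 * d ∧ i + 2 * d ≤ 9 then
        (if 111 * i + 12 * d ≤ N then c + 1 else c) else c) c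
    = c + ((pvRowOf i l).countP (fun x => decide (x ≤ N)) : Int) := by
  intro l
  induction l with
  | nil => intro c; simp [pvRowOf]
  | cons d t ih =>
    intro c
    by_cases hg : 0 ≤ i + 2 * d ∧ i + 2 * d ≤ 9
    · by_cases hN : 111 * i + 12 * d ≤ N
      · simp [List.foldl_cons, hg, hN, ih, pvRowOf]
        ring
      · simp [List.foldl_cons, hg, hN, ih, pvRowOf]
    · simp [List.foldl_cons, hg, ih, pvRowOf]

lemma solution_alt_eq (N : Int) :
    solution_alt N = max 0 (min N 99) + (pvH45.countP (fun x => decide (x ≤ N)) : Int) := by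
  have h1 : PySem.List.pyRange 1 10 1 = [1, 2, 3, 4, 5, 6, 7, 8, 9] := by decide
  have h2 : PySem.List.pyRange (-4) 5 1 = [-4, -3, -2, -1, 0, 1, 2, 3, 4] := by decide
  have hrows : (([1, 2, 3, 4, 5, 6, 7, 8, 9] : List Int).map
      (fun i => pvRowOf i [-4, -3, -2, -1, 0, 1, 2, 3, 4])).flatten = pvH45 := by decide
  simp only [solution_alt, h1, h2, ite_guard3, inner_count,
    PySem.List.foldl_add, ← hrows]
  rw [List.countP_flatten]
  push_cast [List.map_map]
  rfl

-- ===== VERDICT (by name: the statement is the Claim_ definition above) =====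
theorem solution_spec : Claim_equal_solution := by
  intro N _
  unfold Spec_solution
  rw [solution_eq, solution_alt_eq]
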